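-- pv_equiv track=rewrite | github.com/mboylevt/adventofcode | 2024/p7.py | validate_equation_recursive
-- ===== SOURCE A (Python) =====
-- def validate_equation_recursive(result, inputs, p2) -> bool:
--     if len(inputs) == 1:
--         return result == inputs[0]
--     if validate_equation_recursive(result, [inputs[0] + inputs[1]] + inputs[2:], p2):
--         return True
--     if validate_equation_recursive(result, [inputs[0] * inputs[1]] + inputs[2:], p2):
--         return True
--     if p2 and validate_equation_recursive(result, [int(str(inputs[0]) + str(inputs[1]))] + inputs[2:], p2):
--         return True
--     return False
-- ===== SOURCE B (Python) =====
-- def validate_equation_recursive(result, inputs, p2) -> bool: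
--     # level-set dynamic programming: fold over the inputs keeping the set of all
--     # values reachable so far (duplicates collapsed), then test membership.
--     # Digit concatenation is only meaningful for a nonnegative right operand,
--     # so it is applied only then (A raises ValueError whenever it evaluates it
--     # on a negative one).
--     vals = {inputs[0]}
--     for x in inputs[1:]:
--         nxt = set()
--         for v in vals:
--             nxt.add(v + x)
--             nxt.add(v * x)
--             if p2 and x >= 0:
--                 nxt.add(int(str(v) + str(x)))
--         vals = nxt
--     return result in vals
-- ===== Notes on version B (the rewrite author's own statement) =====
-- stated objective: alternative
-- what changed: replaces A's ternary depth-first recursion (re-solving the whole suffix for each operator choice) by an iterative level-set dynamic programming pass that folds once over the inputs maintaining the deduplicated set of reachable values and tests membership at the end; digit concatenation is applied only for nonnegative right operands (where A's int(str+str) raises ValueError whenever evaluated), so B never raises and agrees with A wherever A returns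
-- outside the precondition, e.g. on validate_equation_recursive(-1, [2, -3], True): A returns True, B returns True
import Mathlib
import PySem

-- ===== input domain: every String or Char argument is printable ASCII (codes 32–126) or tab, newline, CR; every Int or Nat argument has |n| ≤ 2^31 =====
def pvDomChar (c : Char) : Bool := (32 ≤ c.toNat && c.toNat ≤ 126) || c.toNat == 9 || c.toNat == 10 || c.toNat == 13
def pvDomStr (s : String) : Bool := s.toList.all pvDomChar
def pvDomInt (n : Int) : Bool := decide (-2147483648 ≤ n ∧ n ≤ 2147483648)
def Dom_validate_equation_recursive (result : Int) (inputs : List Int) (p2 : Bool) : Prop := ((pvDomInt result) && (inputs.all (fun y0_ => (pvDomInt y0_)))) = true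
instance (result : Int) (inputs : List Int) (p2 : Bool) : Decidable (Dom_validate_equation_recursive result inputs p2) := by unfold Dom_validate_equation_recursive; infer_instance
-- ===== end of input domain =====

-- B replaces A's ternary depth-first recursion by one iterative fold keeping the
-- deduplicated set of reachable values (alternative algorithm, same return value
-- wherever A returns one).

-- ===== PORT A =====
-- int(str(a) + str(b)); Python raises ValueError (= none, defaulted) iff b < 0 — excluded by Pre_
def pyConcat (a b : Int) : Int :=
  (PySem.Int.ofChars? (PySem.Int.toChars a ++ PySem.Int.toChars b)).getD 0

def validate_equation_recursive (result : Int) (inputs : List Int) (p2 : Bool) : Bool :=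
  match inputs with
  | [] => false        -- Python raises IndexError here; excluded by Pre_
  | [x] => result == x
  | x :: y :: rest =>
    if validate_equation_recursive result ((x + y) :: rest) p2 then true
    else if validate_equation_recursive result ((x * y) :: rest) p2 then true
    else if p2 && validate_equation_recursive result (pyConcat x y :: rest) p2 then true
    else false
termination_by inputs.length

-- ===== PORT B =====
-- one level step: the inner 'for v in vals' loop building nxt
def vsLevelStep (p2 : Bool) (x : Int) (vals : PySem.Set Int) : PySem.Set Int :=
  vals.foldl (fun nxt v =>
    let nxt := PySem.Set.add nxt (v + x)
    let nxt := PySem.Set.add nxt (v * x)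
    if p2 && decide (0 ≤ x) then PySem.Set.add nxt (pyConcat v x) else nxt) PySem.Set.empty

def validate_equation_recursive_alt (result : Int) (inputs : List Int) (p2 : Bool) : Bool :=
  match inputs with
  | [] => false        -- Python raises IndexError here; excluded by Pre_
  | x :: rest =>
    (rest.foldl (fun vals y => vsLevelStep p2 y vals) (PySem.Set.ofList [x])).contains result

-- ===== PRECONDITION & SPEC =====
-- Pre_ excludes the empty list (IndexError in both programs) and p2-inputs with a
-- negative tail element: there A's int(str+str) raises ValueError whenever it is
-- evaluated, so A either raises or (when a +/* branch short-circuits first) returns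
-- True; B never raises and agrees with A (both True) whenever A returns there, but
-- which of the two A does depends on its search order and is not a closed-form
-- condition on the input.
def Pre_validate_equation_recursive (result : Int) (inputs : List Int) (p2 : Bool) : Prop :=
  inputs ≠ [] ∧ (p2 = true → ∀ v ∈ inputs.tail, 0 ≤ v)
instance (result : Int) (inputs : List Int) (p2 : Bool) : Decidable (Pre_validate_equation_recursive result inputs p2) := by unfold Pre_validate_equation_recursive; infer_instance

def pvWitness_validate_equation_recursive : Int × List Int × Bool := (156, [15, 6], true)

def Spec_validate_equation_recursive (result : Int) (inputs : List Int) (p2 : Bool) (out : Bool) : Prop := out = validate_equation_recursive_alt result inputs p2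
instance (result : Int) (inputs : List Int) (p2 : Bool) (out : Bool) : Decidable (Spec_validate_equation_recursive result inputs p2 out) := by unfold Spec_validate_equation_recursive; infer_instance

-- ===== CLAIM (what is proved, stated in full; the proofs are below) =====
def Claim_equal_validate_equation_recursive : Prop := ∀ (result : Int) (inputs : List Int) (p2 : Bool), Dom_validate_equation_recursive result inputs p2 → Pre_validate_equation_recursive result inputs p2 → Spec_validate_equation_recursive result inputs p2 (validate_equation_recursive result inputs p2)

-- ===== LEMMAS AND PROOFS =====

-- the tree of values A's recursion can produce from accumulator v and remaining list
def lvVals (p2 : Bool) (v : Int) (rest : List Int) : List Int :=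
  match rest with
  | [] => [v]
  | y :: rs =>
    lvVals p2 (v + y) rs ++ lvVals p2 (v * y) rs ++ (if p2 then lvVals p2 (pyConcat v y) rs else [])

-- the tree of values B's guarded step can produce (concat only for 0 ≤ y)
def lvValsG (p2 : Bool) (v : Int) (rest : List Int) : List Int :=
  match rest with
  | [] => [v]
  | y :: rs =>
    lvValsG p2 (v + y) rs ++ lvValsG p2 (v * y) rs ++
      (if p2 && decide (0 ≤ y) then lvValsG p2 (pyConcat v y) rs else [])

theorem lvVals_eq_lvValsG (p2 : Bool) (rest : List Int) (v : Int)
    (h : p2 = true → ∀ y ∈ rest, 0 ≤ y) : lvVals p2 v rest = lvValsG p2 v rest := by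
  induction rest generalizing v with
  | nil => rfl
  | cons y rs ih =>
    have hrs : p2 = true → ∀ z ∈ rs, 0 ≤ z := fun hp z hz => h hp z (List.mem_cons_of_mem _ hz)
    cases hp : p2 with
    | false =>
      subst hp
      simp [lvVals, lvValsG, ih (v + y) hrs, ih (v * y) hrs]
    | true =>
      subst hp
      have hy : 0 ≤ y := h rfl y (List.mem_cons_self)
      simp [lvVals, lvValsG, hy, ih (v + y) hrs, ih (v * y) hrs, ih (pyConcat v y) hrs]

theorem A_cons2 (result x y : Int) (rest : List Int) (p2 : Bool) :
    validate_equation_recursive result (x :: y :: rest) p2 =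
      (validate_equation_recursive result ((x + y) :: rest) p2 ||
       validate_equation_recursive result ((x * y) :: rest) p2 ||
       (p2 && validate_equation_recursive result (pyConcat x y :: rest) p2)) := by
  have hstep : validate_equation_recursive result (x :: y :: rest) p2 =
      (if validate_equation_recursive result ((x + y) :: rest) p2 then true
       else if validate_equation_recursive result ((x * y) :: rest) p2 then true
       else if p2 && validate_equation_recursive result (pyConcat x y :: rest) p2 then true
       else false) := by
    rw [validate_equation_recursive.eq_def]
  rw [hstep]
  cases h1 : validate_equation_recursive result ((x + y) :: rest) p2 <;>
    cases h2 : validate_equation_recursive result ((x * y) :: rest) p2 <;>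
    cases h3 : p2 && validate_equation_recursive result (pyConcat x y :: rest) p2 <;>
    simp_all

theorem A_eq_lvVals (p2 : Bool) (rest : List Int) (v result : Int) :
    validate_equation_recursive result (v :: rest) p2 = decide (result ∈ lvVals p2 v rest) := by
  induction rest generalizing v with
  | nil =>
    have : validate_equation_recursive result [v] p2 = (result == v) := by
      rw [validate_equation_recursive.eq_def]
    rw [this]
    by_cases h : result = v <;> simp [lvVals, h]
  | cons y rs ih =>
    rw [A_cons2, ih (v + y), ih (v * y), ih (pyConcat v y)]
    cases p2 <;> simp [lvVals, Bool.or_assoc]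

-- membership in the inner Set-building fold of vsLevelStep (generalized accumulator)
theorem mem_step_fold (p2 : Bool) (x : Int) (S : List Int) (acc : PySem.Set Int) (w : Int) :
    w ∈ S.foldl (fun nxt v =>
        let nxt := PySem.Set.add nxt (v + x)
        let nxt := PySem.Set.add nxt (v * x)
        if p2 && decide (0 ≤ x) then PySem.Set.add nxt (pyConcat v x) else nxt) acc ↔
      w ∈ acc ∨ ∃ v ∈ S, w = v + x ∨ w = v * x ∨ ((p2 && decide (0 ≤ x)) = true ∧ w = pyConcat v x) := by
  induction S generalizing acc with
  | nil => simp
  | cons v vs ih =>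
    simp only [List.foldl_cons, ih]
    cases hg : p2 && decide (0 ≤ x) <;> simp [PySem.Set.mem_add, or_assoc]

theorem mem_vsLevelStep (p2 : Bool) (x : Int) (vals : PySem.Set Int) (w : Int) :
    w ∈ vsLevelStep p2 x vals ↔
      ∃ v ∈ vals, w = v + x ∨ w = v * x ∨ ((p2 && decide (0 ≤ x)) = true ∧ w = pyConcat v x) := by
  unfold vsLevelStep
  rw [mem_step_fold]
  simp [PySem.Set.empty]

theorem B_fold_mem (p2 : Bool) (rest : List Int) (S : PySem.Set Int) (t : Int) :
    t ∈ rest.foldl (fun vals y => vsLevelStep p2 y vals) S ↔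
      ∃ v ∈ S, t ∈ lvValsG p2 v rest := by
  induction rest generalizing S with
  | nil => simp [lvValsG]
  | cons y rs ih =>
    simp only [List.foldl_cons, ih]
    constructor
    · rintro ⟨w, hw, ht⟩
      rw [mem_vsLevelStep] at hw
      obtain ⟨v, hv, hcase⟩ := hw
      refine ⟨v, hv, ?_⟩
      have hlv : lvValsG p2 v (y :: rs) =
          lvValsG p2 (v + y) rs ++ lvValsG p2 (v * y) rs ++
            (if p2 && decide (0 ≤ y) then lvValsG p2 (pyConcat v y) rs else []) := rfl
      rw [hlv]
      simp only [List.mem_append]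
      rcases hcase with h | h | ⟨hp, h⟩
      · exact Or.inl (Or.inl (h ▸ ht))
      · exact Or.inl (Or.inr (h ▸ ht))
      · right; rw [hp]; simpa using (h ▸ ht)
    · rintro ⟨v, hv, ht⟩
      have hlv : lvValsG p2 v (y :: rs) =
          lvValsG p2 (v + y) rs ++ lvValsG p2 (v * y) rs ++
            (if p2 && decide (0 ≤ y) then lvValsG p2 (pyConcat v y) rs else []) := rfl
      rw [hlv] at ht
      simp only [List.mem_append] at ht
      rcases ht with (h | h) | h
      · exact ⟨v + y, by rw [mem_vsLevelStep]; exact ⟨v, hv, Or.inl rfl⟩, h⟩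
      · exact ⟨v * y, by rw [mem_vsLevelStep]; exact ⟨v, hv, Or.inr (Or.inl rfl)⟩, h⟩
      · cases hg : p2 && decide (0 ≤ y) with
        | false => rw [hg] at h; simp at h
        | true =>
          rw [hg] at h
          exact ⟨pyConcat v y, by rw [mem_vsLevelStep]; exact ⟨v, hv, Or.inr (Or.inr ⟨hg, rfl⟩)⟩,
            by simpa using h⟩

-- ===== VERDICT (by name: the statement is the Claim_ definition above) =====
theorem validate_equation_recursive_spec : Claim_equal_validate_equation_recursive := by
  intro result inputs p2 _ hpre
  unfold Spec_validate_equation_recursive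
  obtain ⟨hne, htail⟩ := hpre
  cases inputs with
  | nil => exact absurd rfl hne
  | cons x rest =>
    rw [A_eq_lvVals, lvVals_eq_lvValsG p2 rest x (by simpa using htail)]
    show decide (result ∈ lvValsG p2 x rest)
        = (rest.foldl (fun vals y => vsLevelStep p2 y vals) (PySem.Set.ofList [x])).contains result
    rw [PySem.Set.contains_eq_listContains, List.contains_eq_mem, decide_eq_decide, B_fold_mem]
    constructor
    · intro h; exact ⟨x, by simp [PySem.Set.mem_ofList], h⟩
    · rintro ⟨v, hv, h⟩
      have hvx : v = x := by simpa [PySem.Set.mem_ofList] using hv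
      exact hvx ▸ h
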